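-- pv_equiv track=rewrite | github.com/2hongbi/baekjoon | 백준/Silver/14562. 태권왕/태권왕.py | bfs
-- ===== SOURCE A (Python) =====
-- from collections import deque
--
-- def bfs(s, t):
--     queue = deque([(s, t, 0)])  # 현재 점수, 상대 점수, 연속 발차기 점수
--
--     while queue:
--         current_score, opponent_score, kicks = queue.popleft()
--
--         if current_score == opponent_score:
--             return kicks
--
--         if current_score < opponent_score:
--             queue.append((current_score * 2, opponent_score + 3, kicks + 1))
--             queue.append((current_score + 1, opponent_score, kicks + 1))
--
--     return -1
-- ===== SOURCE B (Python) =====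
-- def bfs(s, t):
--     # Level-by-level BFS over deduplicated frontier SETS of (current, opponent)
--     # states: kicks = current depth; no queue and no per-path kick counters.
--     frontier = {(s, t)}
--     kicks = 0
--     while frontier:
--         if any(c == o for c, o in frontier):
--             return kicks
--         frontier = {ch for c, o in frontier if c < o
--                     for ch in ((2 * c, o + 3), (c + 1, o))}
--         kicks += 1
--     return -1
-- ===== Notes on version B (the rewrite author's own statement) =====
-- stated objective: alternative
-- what changed: Replaces the deque of (current, opponent, kicks) triples with a level-by-level BFS over deduplicated frontier sets of (current, opponent) states: the depth counter is the kick count and duplicate states are collapsed each level.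
import Mathlib
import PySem

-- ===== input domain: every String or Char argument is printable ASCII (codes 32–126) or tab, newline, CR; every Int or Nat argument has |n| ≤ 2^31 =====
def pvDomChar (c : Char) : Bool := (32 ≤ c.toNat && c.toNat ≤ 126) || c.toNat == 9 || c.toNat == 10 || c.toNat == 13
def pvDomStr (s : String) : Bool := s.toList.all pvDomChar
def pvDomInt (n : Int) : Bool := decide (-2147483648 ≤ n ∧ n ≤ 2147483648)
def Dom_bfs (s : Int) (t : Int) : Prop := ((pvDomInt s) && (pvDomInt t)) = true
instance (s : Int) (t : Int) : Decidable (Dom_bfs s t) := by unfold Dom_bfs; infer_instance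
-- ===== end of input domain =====

-- B replaces A's deque of (current, opponent, kicks) triples by a level-by-level
-- BFS over deduplicated frontier SETS of (current, opponent) states.

-- ===== PORT A =====
-- A's while-loop over the deque, transliterated; the fuel argument only makes the
-- recursion total (it is proved sufficient below, so it never changes the result).
def loopA : Nat → List (Int × Int × Int) → Int
  | 0, _ => -1
  | _ + 1, [] => -1
  | f + 1, (c, o, k) :: q =>
    if c = o then k
    else if c < o then loopA f (q ++ [(2 * c, o + 3, k + 1), (c + 1, o, k + 1)])
    else loopA f q

def bfs (s : Int) (t : Int) : Int := loopA (2 ^ ((t - s).toNat + 2)) [(s, t, 0)]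

-- ===== PORT B =====
-- Source B's set comprehension building the next frontier from the current one.
def stepC (F : PySem.Set (Int × Int)) : PySem.Set (Int × Int) :=
  PySem.Set.ofList (F.flatMap (fun p =>
    if p.1 < p.2 then [(2 * p.1, p.2 + 3), (p.1 + 1, p.2)] else []))

-- Source B's `while frontier:` loop; the fuel argument only makes the loop total
-- ((t - s).toNat + 2 is proved sufficient below).
def loopC : Nat → PySem.Set (Int × Int) → Int → Int
  | 0, _, _ => -1
  | f + 1, F, kicks =>
    if F.isEmpty then -1
    else if F.any (fun p => p.1 == p.2) then kicks
    else loopC f (stepC F) (kicks + 1)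

def bfs_alt (s : Int) (t : Int) : Int :=
  loopC ((t - s).toNat + 2) (PySem.Set.ofList [(s, t)]) 0

-- ===== PRECONDITION & SPEC =====
def Spec_bfs (s : Int) (t : Int) (out : Int) : Prop := out = bfs_alt s t
instance (s : Int) (t : Int) (out : Int) : Decidable (Spec_bfs s t out) := by unfold Spec_bfs; infer_instance

-- ===== CLAIM (what is proved, stated in full; the proofs are below) =====
def Claim_equal_bfs : Prop := ∀ (s : Int) (t : Int), Dom_bfs s t → Spec_bfs s t (bfs s t)

-- ===== LEMMAS AND PROOFS =====

-- proof-side characterisation: equality is reachable in exactly k allowed moves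
def reachB : Nat → Int → Int → Bool
  | 0, c, o => c == o
  | k + 1, c, o => decide (c < o) && (reachB k (2 * c) (o + 3) || reachB k (c + 1) o)

-- forward reachability: x is a state reached from r in exactly k allowed moves
def fwdB : Nat → (Int × Int) → (Int × Int) → Bool
  | 0, r, x => r == x
  | k + 1, r, x => decide (r.1 < r.2) && (fwdB k (2 * r.1, r.2 + 3) x || fwdB k (r.1 + 1, r.2) x)

-- one allowed move
def stepOk (p x : Int × Int) : Prop :=
  p.1 < p.2 ∧ (x = (2 * p.1, p.2 + 3) ∨ x = (p.1 + 1, p.2))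

-- kick counter of a queue entry
def kOf (e : Int × Int × Int) : Int := e.2.2

-- fuel weight of one entry relative to the optimum m
def wE (m : Int) (e : Int × Int × Int) : Nat := 2 ^ (m + 2 - kOf e).toNat - 1

def wt (m : Int) (Q : List (Int × Int × Int)) : Nat := (Q.map (wE m)).sum

-- queue invariant: every entry's kick lies in [head kick, head kick + 1], recursively
def InvQ : List (Int × Int × Int) → Prop
  | [] => True
  | e :: q => (∀ e' ∈ q, kOf e ≤ kOf e' ∧ kOf e' ≤ kOf e + 1) ∧ InvQ q

def Reaches (e : Int × Int × Int) (m : Int) : Prop :=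
  ∃ j : Nat, reachB j e.1 e.2.1 = true ∧ kOf e + j = m

def LB (Q : List (Int × Int × Int)) (m : Int) : Prop :=
  ∀ e ∈ Q, ∀ j : Nat, reachB j e.1 e.2.1 = true → m ≤ kOf e + j

theorem reachB_false_of_lt (j : Nat) (c o : Int) (h : o < c) : reachB j c o = false := by
  cases j with
  | zero => simp [reachB]; omega
  | succ k => simp [reachB]; intro h'; omega

theorem reachB_chain : ∀ (n : Nat) (c o : Int), c + n = o → reachB n c o = true := by
  intro n
  induction n with
  | zero => intro c o h; simp [reachB]; omega
  | succ k ih =>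
    intro c o h
    simp [reachB]
    refine ⟨by omega, Or.inr (ih (c + 1) o (by omega))⟩

theorem inv_append : ∀ (q : List (Int × Int × Int)) (k0 : Int) (x y : Int × Int × Int),
    kOf x = k0 + 1 → kOf y = k0 + 1 →
    (∀ e ∈ q, k0 ≤ kOf e ∧ kOf e ≤ k0 + 1) → InvQ q → InvQ (q ++ [x, y]) := by
  intro q
  induction q with
  | nil =>
    intro k0 x y hx hy _ _
    refine ⟨?_, ⟨by simp, trivial⟩⟩
    intro e' he'
    simp at he'
    rcases he' with rfl | rfl; all_goals omega
  | cons h q ih =>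
    intro k0 x y hx hy hb hinv
    refine ⟨?_, ih k0 x y hx hy (fun e he => hb e (by simp [he])) hinv.2⟩
    intro e' he'
    simp at he'
    have hh := hb h (by simp)
    rcases he' with he' | rfl | rfl
    · exact hinv.1 e' he'
    · omega
    · omega

theorem wE_pos {m : Int} {e : Int × Int × Int} (h : kOf e ≤ m + 1) : 1 ≤ wE m e := by
  have h1 : 1 ≤ (m + 2 - kOf e).toNat := by omega
  have := Nat.pow_le_pow_right (show 1 ≤ 2 by norm_num) h1
  simp [wE]; omega

theorem loopA_main : ∀ (f : Nat) (Q : List (Int × Int × Int)) (m : Int),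
    InvQ Q → (∃ e ∈ Q, Reaches e m) → LB Q m → wt m Q ≤ f → loopA f Q = m := by
  intro f
  induction f with
  | zero =>
    intro Q m _ hex _ hwt
    obtain ⟨e, he, j, _, hj⟩ := hex
    have h1 : 1 ≤ wE m e := wE_pos (by omega)
    have : wE m e ≤ wt m Q :=
      List.single_le_sum (by intro x _; exact Nat.zero_le x) _ (List.mem_map_of_mem he)
    omega
  | succ f ih =>
    intro Q m hinv hex hlb hwt
    match Q with
    | [] => obtain ⟨e, he, _⟩ := hex; simp at he
    | (c, o, k) :: q =>
      -- head has the minimal kick, and the achiever bounds m from below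
      have hkm : k ≤ m := by
        obtain ⟨e, he, j, hr, hj⟩ := hex
        rcases (List.mem_cons.mp he) with rfl | he'
        · simp [kOf] at hj; omega
        · have := (hinv.1 e he').1
          simp [kOf] at this hj ⊢; omega
      by_cases hco : c = o
      · simp only [loopA, if_pos hco]
        have h1 : m ≤ k := by
          have := hlb (c, o, k) (by simp) 0 (by simp [reachB, hco])
          simpa [kOf] using this
        omega
      · by_cases hlt : c < o
        · simp only [loopA, if_neg hco, if_pos hlt]
          set x : Int × Int × Int := (2 * c, o + 3, k + 1) with hxdef
          set y : Int × Int × Int := (c + 1, o, k + 1) with hydef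
          apply ih
          · exact inv_append q k x y rfl rfl (fun e he => hinv.1 e he) hinv.2
          · -- achiever survives
            obtain ⟨e, he, j, hr, hj⟩ := hex
            rcases (List.mem_cons.mp he) with rfl | he'
            · -- head was the achiever; one of its children achieves m with depth j - 1
              cases j with
              | zero => simp [reachB, hco] at hr
              | succ j' =>
                simp [reachB, hlt] at hr
                simp [kOf] at hj
                rcases hr with hr | hr
                · exact ⟨x, by simp, j', hr, by simp [kOf, hxdef]; omega⟩
                · exact ⟨y, by simp, j', hr, by simp [kOf, hydef]; omega⟩
            · exact ⟨e, by simp [he'], j, hr, hj⟩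
          · -- lower bound survives
            intro e he j hr
            rcases List.mem_append.mp he with he' | he'
            · exact hlb e (by simp [he']) j hr
            · simp at he'
              rcases he' with rfl | rfl
              · have : reachB (j + 1) c o = true := by
                  simp [reachB, hlt]; exact Or.inl hr
                have := hlb (c, o, k) (by simp) (j + 1) this
                simp [kOf, hxdef] at this ⊢; omega
              · have : reachB (j + 1) c o = true := by
                  simp [reachB, hlt]; exact Or.inr hr
                have := hlb (c, o, k) (by simp) (j + 1) this
                simp [kOf, hydef] at this ⊢; omega
          · -- fuel decreases by (at least) one
            have hx2 : 2 ≤ (m + 2 - k).toNat := by omega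
            have hsplit : (m + 2 - k).toNat = ((m + 2 - (k + 1)).toNat) + 1 := by omega
            have hpow : (2 : Nat) ^ (m + 2 - k).toNat
                = 2 * 2 ^ (m + 2 - (k + 1)).toNat := by
              rw [hsplit, pow_succ]; ring
            have hp1 : 1 ≤ (2 : Nat) ^ (m + 2 - (k + 1)).toNat := Nat.one_le_two_pow
            have hwtQ : wt m ((c, o, k) :: q) = wE m (c, o, k) + wt m q := by
              simp [wt]
            have hwt' : wt m (q ++ [x, y]) = wt m q + 2 * wE m x := by
              simp [wt, hxdef, hydef, wE, kOf]; ring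
            have hwEh : wE m (c, o, k) = 2 * 2 ^ (m + 2 - (k + 1)).toNat - 1 := by
              simp [wE, kOf] at hpow ⊢; omega
            have hwEx : wE m x = 2 ^ (m + 2 - (k + 1)).toNat - 1 := by
              simp [wE, kOf, hxdef]
            rw [hwt']
            rw [hwtQ, hwEh] at hwt
            rw [hwEx]
            omega
        · -- c > o: the head is discarded
          simp only [loopA, if_neg hco, if_neg hlt]
          have hgt : o < c := by omega
          apply ih
          · exact hinv.2
          · obtain ⟨e, he, j, hr, hj⟩ := hex
            rcases (List.mem_cons.mp he) with rfl | he'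
            · rw [reachB_false_of_lt j c o hgt] at hr; cases hr
            · exact ⟨e, he', j, hr, hj⟩
          · intro e he j hr; exact hlb e (by simp [he]) j hr
          · have h1 : 1 ≤ wE m (c, o, k) := wE_pos (by simp [kOf]; omega)
            have : wt m ((c, o, k) :: q) = wE m (c, o, k) + wt m q := by simp [wt]
            omega

theorem loopA_noreach : ∀ (f : Nat) (Q : List (Int × Int × Int)),
    (∀ e ∈ Q, ∀ j : Nat, reachB j e.1 e.2.1 = false) → loopA f Q = -1 := by
  intro f
  induction f with
  | zero => intro Q _; rfl
  | succ f ih =>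
    intro Q hno
    match Q with
    | [] => rfl
    | (c, o, k) :: q =>
      have hco : ¬ c = o := by
        intro h
        have := hno (c, o, k) (by simp) 0
        simp [reachB, h] at this
      by_cases hlt : c < o
      · simp only [loopA, if_neg hco, if_pos hlt]
        apply ih
        intro e he j
        rcases List.mem_append.mp he with he' | he'
        · exact hno e (by simp [he']) j
        · have hpar := hno (c, o, k) (by simp) (j + 1)
          simp [reachB, hlt] at hpar
          simp at he'
          rcases he' with rfl | rfl
          · exact hpar.1
          · exact hpar.2
      · simp only [loopA, if_neg hco, if_neg hlt]
        exact ih q (fun e he j => hno e (by simp [he]) j)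

theorem reach_iff_fwd : ∀ (k : Nat) (r : Int × Int),
    reachB k r.1 r.2 = true ↔ ∃ x, fwdB k r x = true ∧ x.1 = x.2 := by
  intro k
  induction k with
  | zero =>
    intro r
    constructor
    · intro h
      exact ⟨r, by simp [fwdB], by simpa [reachB] using h⟩
    · rintro ⟨x, hx, he⟩
      have hrx : r = x := by simpa [fwdB] using hx
      subst hrx
      simpa [reachB] using he
  | succ k ih =>
    intro r
    simp only [reachB, fwdB, Bool.and_eq_true, Bool.or_eq_true, decide_eq_true_eq]
    constructor
    · rintro ⟨hlt, h | h⟩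
      · obtain ⟨x, hx, he⟩ := (ih (2 * r.1, r.2 + 3)).mp h
        exact ⟨x, ⟨hlt, Or.inl hx⟩, he⟩
      · obtain ⟨x, hx, he⟩ := (ih (r.1 + 1, r.2)).mp h
        exact ⟨x, ⟨hlt, Or.inr hx⟩, he⟩
    · rintro ⟨x, ⟨hlt, h | h⟩, he⟩
      · exact ⟨hlt, Or.inl ((ih (2 * r.1, r.2 + 3)).mpr ⟨x, h, he⟩)⟩
      · exact ⟨hlt, Or.inr ((ih (r.1 + 1, r.2)).mpr ⟨x, h, he⟩)⟩

theorem fwdB_succ (k : Nat) (r x : Int × Int) :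
    fwdB (k + 1) r x
      = (decide (r.1 < r.2) && (fwdB k (2 * r.1, r.2 + 3) x || fwdB k (r.1 + 1, r.2) x)) := rfl

theorem fwd_snoc : ∀ (k : Nat) (r x : Int × Int),
    fwdB (k + 1) r x = true ↔ ∃ p, fwdB k r p = true ∧ stepOk p x := by
  intro k
  induction k with
  | zero =>
    intro r x
    simp only [fwdB, Bool.and_eq_true, Bool.or_eq_true, decide_eq_true_eq, beq_iff_eq, stepOk]
    constructor
    · rintro ⟨hlt, h | h⟩
      · exact ⟨r, rfl, hlt, Or.inl h.symm⟩
      · exact ⟨r, rfl, hlt, Or.inr h.symm⟩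
    · rintro ⟨p, rfl, hlt, h | h⟩
      · exact ⟨hlt, Or.inl h.symm⟩
      · exact ⟨hlt, Or.inr h.symm⟩
  | succ k ih =>
    intro r x
    constructor
    · intro h
      rw [fwdB_succ, Bool.and_eq_true, Bool.or_eq_true, decide_eq_true_eq] at h
      obtain ⟨hlt, h' | h'⟩ := h
      · obtain ⟨p, hp, hs⟩ := (ih (2 * r.1, r.2 + 3) x).mp h'
        refine ⟨p, ?_, hs⟩
        rw [fwdB_succ, Bool.and_eq_true, Bool.or_eq_true, decide_eq_true_eq]
        exact ⟨hlt, Or.inl hp⟩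
      · obtain ⟨p, hp, hs⟩ := (ih (r.1 + 1, r.2) x).mp h'
        refine ⟨p, ?_, hs⟩
        rw [fwdB_succ, Bool.and_eq_true, Bool.or_eq_true, decide_eq_true_eq]
        exact ⟨hlt, Or.inr hp⟩
    · rintro ⟨p, hp, hs⟩
      rw [fwdB_succ, Bool.and_eq_true, Bool.or_eq_true, decide_eq_true_eq] at hp
      obtain ⟨hlt, hp | hp⟩ := hp
      · have hch : fwdB (k + 1) (2 * r.1, r.2 + 3) x = true := (ih _ x).mpr ⟨p, hp, hs⟩
        rw [fwdB_succ, Bool.and_eq_true, Bool.or_eq_true, decide_eq_true_eq]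
        exact ⟨hlt, Or.inl hch⟩
      · have hch : fwdB (k + 1) (r.1 + 1, r.2) x = true := (ih _ x).mpr ⟨p, hp, hs⟩
        rw [fwdB_succ, Bool.and_eq_true, Bool.or_eq_true, decide_eq_true_eq]
        exact ⟨hlt, Or.inr hch⟩

theorem fwd_prefix : ∀ (k j : Nat) (r : Int × Int),
    reachB (k + j) r.1 r.2 = true → ∃ p, fwdB k r p = true := by
  intro k
  induction k with
  | zero => intro j r _; exact ⟨r, by simp [fwdB]⟩
  | succ k ih =>
    intro j r h
    have hidx : k + 1 + j = (k + j) + 1 := by omega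
    rw [hidx] at h
    simp only [reachB, Bool.and_eq_true, Bool.or_eq_true, decide_eq_true_eq] at h
    obtain ⟨hlt, h | h⟩ := h
    · obtain ⟨p, hp⟩ := ih j (2 * r.1, r.2 + 3) h
      refine ⟨p, ?_⟩
      simp only [fwdB, Bool.and_eq_true, Bool.or_eq_true, decide_eq_true_eq]
      exact ⟨hlt, Or.inl hp⟩
    · obtain ⟨p, hp⟩ := ih j (r.1 + 1, r.2) h
      refine ⟨p, ?_⟩
      simp only [fwdB, Bool.and_eq_true, Bool.or_eq_true, decide_eq_true_eq]
      exact ⟨hlt, Or.inr hp⟩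

theorem mem_stepC (F : PySem.Set (Int × Int)) (x : Int × Int) :
    x ∈ stepC F ↔ ∃ p ∈ F, stepOk p x := by
  unfold stepC
  rw [PySem.Set.mem_ofList, List.mem_flatMap]
  constructor
  · rintro ⟨p, hp, hx⟩
    refine ⟨p, hp, ?_⟩
    by_cases hlt : p.1 < p.2
    · simp [hlt] at hx
      exact ⟨hlt, by tauto⟩
    · simp [hlt] at hx
  · rintro ⟨p, hp, hlt, hx⟩
    exact ⟨p, hp, by rcases hx with rfl | rfl <;> simp [hlt]⟩

theorem loopC_eq (s t : Int) (mN : Nat) (hm : reachB mN s t = true)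
    (hmin : ∀ j : Nat, reachB j s t = true → mN ≤ j) :
    ∀ (f k : Nat) (F : PySem.Set (Int × Int)),
      (∀ x, x ∈ F ↔ fwdB k (s, t) x = true) → k ≤ mN → mN < k + f →
      loopC f F (k : Int) = (mN : Int) := by
  intro f
  induction f with
  | zero => intro k F _ h1 h2; omega
  | succ f ih =>
    intro k F hinv h1 h2
    -- the frontier is nonempty: a prefix of the optimal path lives at level k
    have hne : ∃ p, p ∈ F := by
      have : reachB (k + (mN - k)) s t = true := by
        have : k + (mN - k) = mN := by omega
        rw [this]; exact hm
      obtain ⟨p, hp⟩ := fwd_prefix k (mN - k) (s, t) this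
      exact ⟨p, (hinv p).mpr hp⟩
    obtain ⟨p0, hp0⟩ := hne
    have hempty : F.isEmpty = false := by
      cases F with
      | nil => simp at hp0
      | cons a l => rfl
    have hany : (F.any fun p => p.1 == p.2) = true ↔ reachB k s t = true := by
      rw [List.any_eq_true]
      constructor
      · rintro ⟨x, hx, hxe⟩
        exact (reach_iff_fwd k (s, t)).mpr ⟨x, (hinv x).mp hx, by simpa using hxe⟩
      · intro h
        obtain ⟨x, hx, he⟩ := (reach_iff_fwd k (s, t)).mp h
        exact ⟨x, (hinv x).mpr hx, by simpa using he⟩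
    by_cases hk : k = mN
    · subst hk
      have : (F.any fun p => p.1 == p.2) = true := hany.mpr hm
      simp [loopC, hempty, this]
    · have hklt : k < mN := by omega
      have hfalse : (F.any fun p => p.1 == p.2) = false := by
        rcases Bool.eq_false_or_eq_true (F.any fun p => p.1 == p.2) with h | h
        · have := hmin k (hany.mp h); omega
        · exact h
      have hstep : ∀ x, x ∈ stepC F ↔ fwdB (k + 1) (s, t) x = true := by
        intro x
        rw [mem_stepC, fwd_snoc]
        constructor
        · rintro ⟨p, hp, hs⟩; exact ⟨p, (hinv p).mp hp, hs⟩
        · rintro ⟨p, hp, hs⟩; exact ⟨p, (hinv p).mpr hp, hs⟩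
      have hrec := ih (k + 1) (stepC F) hstep (by omega) (by omega)
      simp only [loopC, hempty, hfalse, Bool.false_eq_true, if_false]
      rw [← hrec]
      norm_num

theorem bfs_eq (s t : Int) : bfs s t = bfs_alt s t := by
  by_cases hst : t < s
  · have hA : bfs s t = -1 := by
      apply loopA_noreach
      intro e he j
      simp at he
      rw [he]
      exact reachB_false_of_lt j s t hst
    have hofl : PySem.Set.ofList [(s, t)] = [(s, t)] := by
      simp [PySem.Set.ofList, PySem.Set.add]
    have hfuel : (t - s).toNat + 2 = 2 := by omega
    have hB : bfs_alt s t = -1 := by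
      rw [bfs_alt, hfuel, hofl]
      have h1 : ¬ ((s, t).1 = (s, t).2) := by simp; omega
      have h2 : stepC [(s, t)] = [] := by
        simp [stepC, show ¬ (s < t) by omega]
      simp [loopC, h1, h2]
    rw [hA, hB]
  · -- s ≤ t : both sides compute the least k with reachB k s t
    have hle : s ≤ t := by omega
    have hex : ∃ n : Nat, reachB n s t = true :=
      ⟨(t - s).toNat, reachB_chain _ s t (by omega)⟩
    set mN := Nat.find hex with hmN
    have hm : reachB mN s t = true := Nat.find_spec hex
    have hmin : ∀ j : Nat, reachB j s t = true → mN ≤ j := fun j hj => Nat.find_min' hex hj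
    have hbound : mN ≤ (t - s).toNat := hmin _ (reachB_chain _ s t (by omega))
    have hA : bfs s t = (mN : Int) := by
      apply loopA_main
      · exact ⟨by simp, trivial⟩
      · exact ⟨(s, t, 0), by simp, mN, hm, by simp [kOf]⟩
      · intro e he j hr
        simp at he
        rw [he] at hr ⊢
        have := hmin j hr
        simp [kOf]; omega
      · have h0 : (((mN : Nat) : Int) + 2 - kOf (s, t, 0)).toNat = mN + 2 := by
          simp [kOf]; omega
        have hwt : wt (mN : Int) [(s, t, 0)] = 2 ^ (mN + 2) - 1 := by
          simp [wt, wE, h0]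
        rw [hwt]
        have := Nat.pow_le_pow_right (show 1 ≤ 2 by norm_num)
          (show mN + 2 ≤ (t - s).toNat + 2 by omega)
        have h1 : 1 ≤ 2 ^ (mN + 2) := Nat.one_le_two_pow
        omega
    have hB : bfs_alt s t = (mN : Int) := by
      rw [bfs_alt]
      have hinv0 : ∀ x, x ∈ PySem.Set.ofList [(s, t)] ↔ fwdB 0 (s, t) x = true := by
        intro x
        rw [PySem.Set.mem_ofList, List.mem_singleton,
          show fwdB 0 (s, t) x = ((s, t) == x) from rfl, beq_iff_eq]
        exact eq_comm
      have := loopC_eq s t mN hm hmin ((t - s).toNat + 2) 0 (PySem.Set.ofList [(s, t)])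
        hinv0 (by omega) (by omega)
      exact_mod_cast this
    rw [hA, hB]

-- ===== VERDICT (by name: the statement is the Claim_ definition above) =====
theorem bfs_spec : Claim_equal_bfs := by
  intro s t _
  show bfs s t = bfs_alt s t
  exact bfs_eq s t
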